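-- pv_equiv track=rewrite | github.com/ElchaabiMohamed/InferCode_SVM | NC-5690-python-files/program_5640.py | motPalindrome
-- ===== SOURCE A (Python) =====
-- def motPalindrome(mot):
--     if len(mot)==0:
--       res=True
--     else:
--       ok=True
--       i=0
--       while i<len(mot) and ok:
--         ok=mot[i]==mot[-1]
--         i+=1
--       res=ok
--     return res
-- ===== SOURCE B (Python) =====
-- def motPalindrome(mot):
--     return mot == mot[:1] * len(mot)
-- ===== Notes on version B (the rewrite author's own statement) =====
-- stated objective: simpler
-- what changed: Replaces the early-exit index loop comparing each character to the last one by a single whole-string comparison against the first character repeated len(mot) times.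
import Mathlib
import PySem

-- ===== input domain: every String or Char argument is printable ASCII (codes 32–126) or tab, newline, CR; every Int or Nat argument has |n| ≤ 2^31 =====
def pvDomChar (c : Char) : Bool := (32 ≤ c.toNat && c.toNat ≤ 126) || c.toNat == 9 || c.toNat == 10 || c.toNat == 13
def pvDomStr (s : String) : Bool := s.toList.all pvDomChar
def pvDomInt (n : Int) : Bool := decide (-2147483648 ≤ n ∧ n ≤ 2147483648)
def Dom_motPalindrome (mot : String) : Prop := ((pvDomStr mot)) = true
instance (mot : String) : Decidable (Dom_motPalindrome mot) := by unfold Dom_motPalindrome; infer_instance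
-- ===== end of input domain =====

-- B replaces A's early-exit comparison loop by one whole-string comparison with the
-- first character repeated len(mot) times (objective: simpler).

-- ===== PORT A =====
-- the while loop: while i < len(mot) and ok: ok = mot[i]==mot[-1]; i += 1
def motPalindromeLoop (l : List Char) (last : Char) (i : Nat) (ok : Bool) : Bool :=
  if h : i < l.length ∧ ok = true then
    motPalindromeLoop l last (i + 1) (l[i]'h.1 == last)
  else ok
termination_by l.length - i

def motPalindrome (mot : String) : Bool :=
  let l := mot.toList
  if l.length = 0 then true
  else
    match PySem.List.pyGet? l (-1) with   -- mot[-1]; the branch guarantees it exists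
    | some last => motPalindromeLoop l last 0 true
    | none => true   -- unreachable: l is nonempty here

-- ===== PORT B =====
-- return mot == mot[:1] * len(mot)
def motPalindrome_alt (mot : String) : Bool :=
  let l := mot.toList
  l == List.flatten (List.replicate l.length (l.take 1))

-- ===== PRECONDITION & SPEC =====
def Spec_motPalindrome (mot : String) (out : Bool) : Prop := out = motPalindrome_alt mot
instance (mot : String) (out : Bool) : Decidable (Spec_motPalindrome mot out) := by unfold Spec_motPalindrome; infer_instance

-- ===== CLAIM (what is proved, stated in full; the proofs are below) =====
def Claim_equal_motPalindrome : Prop := ∀ (mot : String), Dom_motPalindrome mot → Spec_motPalindrome mot (motPalindrome mot)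

-- ===== LEMMAS AND PROOFS =====

theorem motPalindromeLoop_eq (l : List Char) (last : Char) :
    ∀ (i : Nat) (ok : Bool), motPalindromeLoop l last i ok = (ok && (l.drop i).all (· == last)) := by
  intro i ok
  fun_induction motPalindromeLoop l last i ok with
  | case1 i ok h ih =>
      obtain ⟨hi, hok⟩ := h
      subst hok
      rw [ih]
      have hd : l.drop i = l[i] :: l.drop (i + 1) := List.drop_eq_getElem_cons hi
      rw [hd, List.all_cons]
      simp
  | case2 i ok h =>
      by_cases hok : ok = true
      · have hi : ¬ i < l.length := fun hi => h ⟨hi, hok⟩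
        simp [hok, List.drop_of_length_le (Nat.le_of_not_lt hi)]
      · simp [Bool.not_eq_true] at hok
        simp [hok]

theorem flatten_replicate_singleton (n : Nat) (c : Char) :
    List.flatten (List.replicate n [c]) = List.replicate n c := by
  induction n with
  | zero => rfl
  | succ n ih => simp [List.replicate_succ, ih]

theorem all_eq_last_iff_replicate (h : Char) (t : List Char) :
    ((h :: t).all (· == (h :: t).getLast (by simp)) = true) ↔
      (h :: t) = List.replicate (t.length + 1) h := by
  constructor
  · intro hall
    have hall' : ∀ x ∈ h :: t, x = (h :: t).getLast (by simp) := by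
      simpa [List.all_eq_true] using hall
    have hh : h = (h :: t).getLast (by simp) := hall' h (by simp)
    have : ∀ x ∈ h :: t, x = h := fun x hx => (hall' x hx).trans hh.symm
    rw [List.eq_replicate_iff]
    exact ⟨by simp, fun x hx => this x hx⟩
  · intro hrep
    have hmem : ∀ x ∈ h :: t, x = h := by
      intro x hx; rw [hrep] at hx; exact (List.eq_of_mem_replicate hx)
    have hlast : (h :: t).getLast (by simp) = h :=
      hmem _ (List.getLast_mem _)
    simp [List.all_eq_true, hlast]
    intro x hx
    simpa using hmem x (by simp [hx])

theorem motPalindrome_core (l : List Char) :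
    (if l.length = 0 then true
     else match PySem.List.pyGet? l (-1) with
          | some last => motPalindromeLoop l last 0 true
          | none => true)
    = (l == List.flatten (List.replicate l.length (l.take 1))) := by
  cases l with
  | nil => rfl
  | cons h t =>
      have hne : (h :: t) ≠ [] := by simp
      have hget : PySem.List.pyGet? (h :: t) (-1) = some ((h :: t).getLast hne) := by
        rw [PySem.List.pyGet?_neg_one, List.getLast?_eq_some_getLast hne]
      rw [if_neg (by simp), hget]
      show motPalindromeLoop (h :: t) ((h :: t).getLast hne) 0 true =
        (h :: t == (List.replicate (h :: t).length (List.take 1 (h :: t))).flatten)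
      rw [motPalindromeLoop_eq]
      simp only [Bool.true_and, List.drop_zero, List.length_cons, List.take_succ_cons,
        List.take_zero, flatten_replicate_singleton]
      cases hb : (h :: t).all (· == (h :: t).getLast hne) with
      | true =>
          have := (all_eq_last_iff_replicate h t).1 hb
          simp [this]
      | false =>
          have : ¬ (h :: t) = List.replicate (t.length + 1) h := by
            intro hr
            have := (all_eq_last_iff_replicate h t).2 hr
            rw [this] at hb
            simp at hb
          simp [this]

-- ===== VERDICT (by name: the statement is the Claim_ definition above) =====
theorem motPalindrome_spec : Claim_equal_motPalindrome := by
  intro mot _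
  unfold Spec_motPalindrome motPalindrome motPalindrome_alt
  exact motPalindrome_core mot.toList
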